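-- pv_equiv track=rewrite | github.com/leeyongjoo/solved-algorithm-problem | programmers/weekly/week_3.py | solution
-- ===== SOURCE A (Python) =====
-- def find_nums_dfs(matrix, to_find_num):
--     direction = [
--         (0, 1), (1, 0), (0, -1), (-1, 0)  # 동, 남, 서, 북
--     ]
--
--     rn = len(matrix)
--     cn = len(matrix[0])
--
--     block = []
--     blocks = []
--
--     for i in range(rn):
--         for j in range(cn):
--             if matrix[i][j] == to_find_num:
--
--                 stack = [(i, j)]
--                 while len(stack) > 0:
--                     x, y = stack.pop()
--
--                     if 0 <= x < rn and 0 <= y < cn: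
--                         if matrix[x][y] == to_find_num:
--                             matrix[x][y] = -1
--                             block.append([x, y])
--                             for dx, dy in direction:
--                                 stack.append((x + dx, y + dy))
--                 blocks.append(block)
--                 block = []
--     return blocks
--
-- def rotate_block(block):
--     n = max(map(lambda a: max(a), block))
--     new_blocks = []
--     for x, y in block:
--         new_blocks.append([y, n - x])
--     return new_blocks
--
-- def move_block_to_zero(block):
--     min_x = min(map(lambda a: a[0], block))
--     min_y = min(map(lambda a: a[1], block))
--     return list(map(lambda a: [a[0] - min_x, a[1] - min_y], block))
--
-- def solution(game_board, table):
--     spaces = find_nums_dfs(game_board, 0)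
--     blocks = find_nums_dfs(table, 1)
--
--     spaces_moved_sorted = list(map(sorted, map(move_block_to_zero, spaces)))  # 2차원
--     blocks_rotated_moved_sorted: list[list[list[int]]] = []  # 3차원
--     for block in blocks:
--         rotated_blocks = [sorted(move_block_to_zero(block))]
--         for _ in range(3):
--             block = rotate_block(block)  # 회전
--             block = move_block_to_zero(block)  # 0 으로 이동
--             block = sorted(block)  # 정렬
--             rotated_blocks.append(block)
--         blocks_rotated_moved_sorted.append(rotated_blocks)
--
--     match_block_cnt = 0
--     matched_space = set()
--     matched_block = set()
--
--     for i, space in enumerate(spaces_moved_sorted):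
--         for j, four_blocks in enumerate(blocks_rotated_moved_sorted):
--
--             if i not in matched_space and j not in matched_block:
--                 if len(spaces[i]) == len(four_blocks[0]):
--                     for fbi in range(4):  # four blocks index
--                         if space == four_blocks[fbi]:
--                             match_block_cnt += len(four_blocks[fbi])
--                             matched_space.add(i)
--                             matched_block.add(j)
--                             break
--     return match_block_cnt
-- ===== SOURCE B (Python) =====
-- # B: same component extraction, but matching via a hash index (form -> candidate block ids)
-- # instead of A's nested scan over all blocks per space.  Note: like A, this mutates
-- # game_board and table in place (cells of found components are set to -1).
--
-- def find_nums_dfs(matrix, to_find_num):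
--     direction = [
--         (0, 1), (1, 0), (0, -1), (-1, 0)
--     ]
--
--     rn = len(matrix)
--     cn = len(matrix[0])
--
--     block = []
--     blocks = []
--
--     for i in range(rn):
--         for j in range(cn):
--             if matrix[i][j] == to_find_num:
--
--                 stack = [(i, j)]
--                 while len(stack) > 0:
--                     x, y = stack.pop()
--
--                     if 0 <= x < rn and 0 <= y < cn:
--                         if matrix[x][y] == to_find_num:
--                             matrix[x][y] = -1
--                             block.append([x, y])
--                             for dx, dy in direction:
--                                 stack.append((x + dx, y + dy))
--                 blocks.append(block)
--                 block = []
--     return blocks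
--
-- def rotate_block(block):
--     n = max(map(lambda a: max(a), block))
--     new_blocks = []
--     for x, y in block:
--         new_blocks.append([y, n - x])
--     return new_blocks
--
-- def move_block_to_zero(block):
--     min_x = min(map(lambda a: a[0], block))
--     min_y = min(map(lambda a: a[1], block))
--     return list(map(lambda a: [a[0] - min_x, a[1] - min_y], block))
--
-- def solution(game_board, table):
--     spaces = find_nums_dfs(game_board, 0)
--     blocks = find_nums_dfs(table, 1)
--
--     # index every rotated form of every block: form -> candidate block ids.
--     # buckets are built from reversed(pairs), so each bucket holds ids in DESCENDING
--     # order and pop() from the end always yields the smallest remaining candidate;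
--     # consumed/matched ids are popped for good.
--     pairs = []
--     for j, b in enumerate(blocks):
--         cur = b
--         forms = [sorted(move_block_to_zero(b))]
--         for _ in range(3):
--             cur = sorted(move_block_to_zero(rotate_block(cur)))
--             forms.append(cur)
--         for f in forms:
--             pairs.append((tuple(map(tuple, f)), j))
--     buckets = {}
--     for key, j in reversed(pairs):
--         buckets.setdefault(key, []).append(j)
--
--     matched = set()
--     cnt = 0
--     for s in spaces:
--         key = tuple(map(tuple, sorted(move_block_to_zero(s))))
--         q = buckets.get(key)
--         if q is not None:
--             while q and q[-1] in matched:
--                 q.pop()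
--             if q:
--                 matched.add(q.pop())
--                 cnt += len(s)
--     return cnt
-- ===== Notes on version B (the rewrite author's own statement) =====
-- stated objective: alternative
-- what changed: A matches each space by scanning every block and comparing against its four rotated forms (quadratic greedy); B builds a hash index from each rotated form to the ascending list of candidate block ids once and consumes each bucket destructively, so each space does one dictionary lookup instead of a scan over all blocks.
import Mathlib
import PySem

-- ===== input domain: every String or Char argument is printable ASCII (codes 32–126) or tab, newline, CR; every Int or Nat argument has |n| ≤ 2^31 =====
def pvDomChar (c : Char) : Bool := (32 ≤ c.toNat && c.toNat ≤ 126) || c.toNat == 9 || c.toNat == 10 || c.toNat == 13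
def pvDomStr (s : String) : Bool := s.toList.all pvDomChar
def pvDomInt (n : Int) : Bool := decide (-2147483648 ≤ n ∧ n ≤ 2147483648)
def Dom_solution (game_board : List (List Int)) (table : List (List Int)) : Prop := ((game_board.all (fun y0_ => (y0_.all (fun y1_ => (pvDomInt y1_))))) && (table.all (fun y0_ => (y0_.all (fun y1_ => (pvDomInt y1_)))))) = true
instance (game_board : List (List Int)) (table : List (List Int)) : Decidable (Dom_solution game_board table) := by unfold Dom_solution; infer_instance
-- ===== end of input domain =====

-- B matches spaces to blocks through a hash index (rotated form -> candidate block ids,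
-- consumed destructively) instead of A's nested scan of every block for every space.
-- Like A, the Python B mutates game_board and table in place (found cells are set to -1);
-- the equivalence proved here is about the return value.

abbrev Shape := List (Int × Int)

-- ===== PORT A =====
-- Shared helpers (Source B contains these helpers verbatim; both ports use them).

-- sorted(block): Python sorts lists [x, y] lexicographically; cells are ported as pairs.
def sortShape (block : Shape) : Shape := PySem.List.sorted2 block (fun a => a.1) (fun a => a.2)

-- rotate_block; max(...) total via maxD (blocks coming from find_nums_dfs are nonempty)
def rotateBlock (block : Shape) : Shape :=
  let n := PySem.List.maxD (block.map (fun a => max a.1 a.2)) (fun x => x) 0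
  block.map (fun a => (a.2, n - a.1))

-- move_block_to_zero; min(...) total via minD (call sites pass nonempty blocks)
def moveBlockToZero (block : Shape) : Shape :=
  let min_x := PySem.List.minD (block.map (fun a => a.1)) (fun x => x) 0
  let min_y := PySem.List.minD (block.map (fun a => a.2)) (fun x => x) 0
  block.map (fun a => (a.1 - min_x, a.2 - min_y))

def dfsDirection : List (Int × Int) := [(0, 1), (1, 0), (0, -1), (-1, 0)]

-- the 'while len(stack) > 0' loop of find_nums_dfs.  Python pops/pushes at the END of the
-- list; here the top of the stack is the HEAD, so the four pushes are prepended reversed.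
-- fuel only makes the recursion structural: one while loop runs at most 1 + 4*rn*cn
-- iterations (each marking pushes 4, and at most rn*cn cells are ever marked), below the
-- fuel the caller supplies, so the 0-fuel branch is never taken.
def dfsWhile (fuel : Nat) (t rn cn : Int) (m : List (List Int)) (stack : List (Int × Int))
    (block : Shape) : List (List Int) × Shape :=
  match fuel with
  | 0 => (m, block)
  | fuel + 1 =>
    match stack with
    | [] => (m, block)
    | (x, y) :: rest =>
      if 0 ≤ x ∧ x < rn ∧ 0 ≤ y ∧ y < cn then
        if PySem.List.pyGetD (PySem.List.pyGetD m x []) y 0 = t then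
          dfsWhile fuel t rn cn
            (PySem.List.pySetD m x (PySem.List.pySetD (PySem.List.pyGetD m x []) y (-1)))
            ((dfsDirection.map (fun d => (x + d.1, y + d.2))).reverse ++ rest)
            (block ++ [(x, y)])
        else dfsWhile fuel t rn cn m rest block
      else dfsWhile fuel t rn cn m rest block

-- find_nums_dfs(matrix, to_find_num): returns the list of blocks (the Python also mutates
-- matrix; the mutated matrix is threaded through the fold and dropped at the end as the
-- callers never reuse it).  len(matrix[0]) raises IndexError on [] — excluded by Pre_.
def findNumsDfs (matrix : List (List Int)) (toFindNum : Int) : List Shape :=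
  let rn := PySem.List.len matrix
  let cn := PySem.List.len (PySem.List.pyGetD matrix 0 [])
  ((PySem.List.pyRange 0 rn 1).foldl (fun st i =>
    (PySem.List.pyRange 0 cn 1).foldl (fun (st : List (List Int) × List Shape) j =>
      if PySem.List.pyGetD (PySem.List.pyGetD st.1 i []) j 0 = toFindNum then
        let r := dfsWhile (5 * (rn * cn) + 5).toNat toFindNum rn cn st.1 [(i, j)] []
        (r.1, st.2 ++ [r.2])
      else st) st) (matrix, [])).2

-- 'for fbi in range(4): if space == four_blocks[fbi]: ...; break'
def fbiLoop (fbis : List Int) (space : Shape) (fourBlocks : List Shape) (i j : Int)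
    (st : Int × PySem.Set Int × PySem.Set Int) : Int × PySem.Set Int × PySem.Set Int :=
  match fbis with
  | [] => st
  | fbi :: rest =>
    if space = PySem.List.pyGetD fourBlocks fbi [] then
      (st.1 + PySem.List.len (PySem.List.pyGetD fourBlocks fbi []),
       PySem.Set.add st.2.1 i, PySem.Set.add st.2.2 j)
    else fbiLoop rest space fourBlocks i j st

-- body of A's 'for j, four_blocks in enumerate(...)' loop; st = (match_block_cnt, matched_space, matched_block)
def stepA (spaces : List Shape) (i : Int) (space : Shape)
    (st : Int × PySem.Set Int × PySem.Set Int) (q : Int × List Shape) :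
    Int × PySem.Set Int × PySem.Set Int :=
  if ¬ PySem.Set.contains st.2.1 i = true ∧ ¬ PySem.Set.contains st.2.2 q.1 = true then
    if PySem.List.len (PySem.List.pyGetD spaces i []) = PySem.List.len (PySem.List.pyGetD q.2 0 []) then
      fbiLoop (PySem.List.pyRange 0 4 1) space q.2 i q.1 st
    else st
  else st

def solution (game_board : List (List Int)) (table : List (List Int)) : Int :=
  let spaces := findNumsDfs game_board 0
  let blocks := findNumsDfs table 1
  let spacesMovedSorted := spaces.map (fun s => sortShape (moveBlockToZero s))
  let blocksRotatedMovedSorted := blocks.map (fun block =>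
    ((List.range 3).foldl (fun (st : Shape × List Shape) _ =>
        let b := sortShape (moveBlockToZero (rotateBlock st.1))
        (b, st.2 ++ [b]))
      (block, [sortShape (moveBlockToZero block)])).2)
  ((PySem.List.enumerate spacesMovedSorted).foldl (fun st p =>
      (PySem.List.enumerate blocksRotatedMovedSorted).foldl (stepA spaces p.1 p.2) st)
    (0, ([] : PySem.Set Int), ([] : PySem.Set Int))).1

-- ===== PORT B =====
-- body of B's 'for s in spaces' loop; st = (cnt, matched, buckets).  Python stores each
-- bucket in DESCENDING id order (it is filled from reversed(pairs)) and pops candidates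
-- from the END; the port keeps each bucket reversed (Python's last element = head), so it
-- is built from pairs in order and consumed from the head: 'while q and q[-1] in matched:
-- q.pop()' is dropWhile, the final 'q.pop()' takes the head.
def stepB (st : Int × PySem.Set Int × PySem.Dict Shape (List Int)) (s : Shape) :
    Int × PySem.Set Int × PySem.Dict Shape (List Int) :=
  let key := sortShape (moveBlockToZero s)
  if st.2.2.contains key then
    match (st.2.2.getD key []).dropWhile (fun j => PySem.Set.contains st.2.1 j) with
    | [] => (st.1, st.2.1, st.2.2.insert key [])
    | j :: rest => (st.1 + PySem.List.len s, PySem.Set.add st.2.1 j, st.2.2.insert key rest)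
  else st

def solution_alt (game_board : List (List Int)) (table : List (List Int)) : Int :=
  let spaces := findNumsDfs game_board 0
  let blocks := findNumsDfs table 1
  -- pairs: every rotated form of every block, tagged with its block id
  -- (the Python turns the form into a tuple of tuples only to make it hashable)
  let pairs := (PySem.List.enumerate blocks).foldl (fun (acc : List (Shape × Int)) p =>
      let forms := ((List.range 3).foldl (fun (st : Shape × List Shape) _ =>
          let cur := sortShape (moveBlockToZero (rotateBlock st.1))
          (cur, st.2 ++ [cur]))
        (p.2, [sortShape (moveBlockToZero p.2)])).2
      acc ++ forms.map (fun f => (f, p.1))) []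
  let buckets := pairs.foldl (fun (d : PySem.Dict Shape (List Int)) p =>
      d.modify p.1 [] (fun q => q ++ [p.2])) PySem.Dict.empty
  (spaces.foldl stepB (0, ([] : PySem.Set Int), buckets)).1

-- ===== PRECONDITION & SPEC =====
-- Pre_ excludes exactly the inputs where the Python A raises IndexError: an empty outer
-- list (len(matrix[0]) fails) or a board with a row SHORTER than row 0 (the scan reads
-- matrix[i][j] for every j < len(matrix[0])), for either argument; rows longer than row 0
-- are fine (their extra cells are simply never visited).
def Pre_solution (game_board : List (List Int)) (table : List (List Int)) : Prop :=
  game_board ≠ [] ∧ table ≠ [] ∧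
  (game_board.all (fun r => (game_board.headD []).length ≤ r.length) = true) ∧
  (table.all (fun r => (table.headD []).length ≤ r.length) = true)
instance (game_board : List (List Int)) (table : List (List Int)) : Decidable (Pre_solution game_board table) := by unfold Pre_solution; infer_instance

def pvWitness_solution : List (List Int) × List (List Int) := ([[0, 0], [1, 0]], [[1, 1], [0, 1]])

def Spec_solution (game_board : List (List Int)) (table : List (List Int)) (out : Int) : Prop := out = solution_alt game_board table
instance (game_board : List (List Int)) (table : List (List Int)) (out : Int) : Decidable (Spec_solution game_board table out) := by unfold Spec_solution; infer_instance

-- ===== CLAIM (what is proved, stated in full; the proofs are below) =====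
def Claim_equal_solution : Prop := ∀ (game_board : List (List Int)) (table : List (List Int)), Dom_solution game_board table → Pre_solution game_board table → Spec_solution game_board table (solution game_board table)

-- ===== LEMMAS AND PROOFS =====

-- the key of a space / the first form of a block
def gKey (s : Shape) : Shape := sortShape (moveBlockToZero s)
-- one rotation step of A's pipeline
def rStep (b : Shape) : Shape := sortShape (moveBlockToZero (rotateBlock b))
-- the four forms A compares against (and B indexes)
def forms4 (b : Shape) : List Shape := [gKey b, rStep b, rStep (rStep b), rStep (rStep (rStep b))]
-- the contribution of enumerated block p to the bucket of key k
def repOf (k : Shape) (p : Int × Shape) : List Int :=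
  ((forms4 p.2).filter (fun f => f == k)).map (fun _ => p.1)
-- the full (ascending) candidate list for key k
def bucket0 (blocks : List Shape) (k : Shape) : List Int :=
  (PySem.List.enumerate blocks).flatMap (repOf k)
-- invariant tying B's evolving dict to the pristine buckets
def BInv (blocks : List Shape) (mb : PySem.Set Int) (bq : PySem.Dict Shape (List Int)) : Prop :=
  ∀ k, (∃ pre, bucket0 blocks k = pre ++ bq.getD k [] ∧ ∀ j ∈ pre, j ∈ mb) ∧
       (bq.contains k = true ↔ bucket0 blocks k ≠ [])

-- proof-side names for B's pairs / buckets terms (definitionally the port's)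
def pairsOf (blocks : List Shape) : List (Shape × Int) :=
  (PySem.List.enumerate blocks).foldl (fun (acc : List (Shape × Int)) p =>
      let forms := ((List.range 3).foldl (fun (st : Shape × List Shape) _ =>
          let cur := sortShape (moveBlockToZero (rotateBlock st.1))
          (cur, st.2 ++ [cur]))
        (p.2, [sortShape (moveBlockToZero p.2)])).2
      acc ++ forms.map (fun f => (f, p.1))) []
def bucketsOf (blocks : List Shape) : PySem.Dict Shape (List Int) :=
  (pairsOf blocks).foldl (fun (d : PySem.Dict Shape (List Int)) p =>
      d.modify p.1 [] (fun q => q ++ [p.2])) PySem.Dict.empty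

lemma enumerate_cons_pv {α : Type} (x : α) (t : List α) (n : Int) :
    PySem.List.enumerate (x :: t) n = (n, x) :: PySem.List.enumerate t (n + 1) := rfl

lemma repOf_eq_replicate (k : Shape) (p : Int × Shape) :
    repOf k p = List.replicate ((forms4 p.2).filter (fun f => f == k)).length p.1 := by
  simp [repOf, List.map_const']

lemma formsFold_eq (b : Shape) :
    ((List.range 3).foldl (fun (st : Shape × List Shape) _ =>
        let c := sortShape (moveBlockToZero (rotateBlock st.1))
        (c, st.2 ++ [c]))
      (b, [sortShape (moveBlockToZero b)])).2 = forms4 b := by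
  rfl

lemma length_sortShape (b : Shape) : (sortShape b).length = b.length := by
  exact (PySem.List.sorted2_perm b _ _ false).length_eq

lemma length_gKey (s : Shape) : (gKey s).length = s.length := by
  rw [gKey, length_sortShape]; simp [moveBlockToZero]

lemma length_of_mem_forms4 {k b : Shape} (h : k ∈ forms4 b) : k.length = b.length := by
  have hr : ∀ x : Shape, (rStep x).length = x.length := by
    intro x; rw [rStep, length_sortShape]; simp [moveBlockToZero, rotateBlock]
  simp only [forms4, List.mem_cons, List.not_mem_nil, or_false] at h
  rcases h with h | h | h | h <;> subst h <;> simp [hr, length_gKey]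

lemma fbiLoop_eq (k b : Shape) (i j : Int) (st : Int × PySem.Set Int × PySem.Set Int) :
    fbiLoop (PySem.List.pyRange 0 4 1) k (forms4 b) i j st =
      if k ∈ forms4 b then (st.1 + PySem.List.len k, PySem.Set.add st.2.1 i, PySem.Set.add st.2.2 j)
      else st := by
  have h4 : PySem.List.pyRange 0 4 1 = [0, 1, 2, 3] := by decide
  rw [h4]
  simp only [forms4, fbiLoop]
  simp only [pysem]
  by_cases h0 : k = gKey b
  · subst h0; simp
  by_cases h1 : k = rStep b
  · subst h1; simp_all
  by_cases h2 : k = rStep (rStep b)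
  · subst h2; simp_all
  by_cases h3 : k = rStep (rStep (rStep b))
  · subst h3; simp_all
  · simp_all

lemma stepA_skip (spaces : List Shape) (i : Int) (space : Shape)
    (L : List (Int × List Shape)) (st : Int × PySem.Set Int × PySem.Set Int)
    (h : i ∈ st.2.1) : L.foldl (stepA spaces i space) st = st := by
  induction L generalizing st with
  | nil => rfl
  | cons q L ih =>
    have hst : stepA spaces i space st q = st := by
      simp [stepA, h]
    rw [List.foldl_cons, hst]; exact ih st h

-- A's inner loop over all blocks = first unmatched candidate of the bucket
lemma innerA (spaces : List Shape) (s : Shape) (i : Int) :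
    ∀ (l : List Shape) (n : Int) (c : Int) (ms mb : PySem.Set Int),
    i ∉ ms →
    PySem.List.len (PySem.List.pyGetD spaces i []) = PySem.List.len s →
    (PySem.List.enumerate (l.map forms4) n).foldl (stepA spaces i (gKey s)) (c, ms, mb) =
      match ((PySem.List.enumerate l n).flatMap (repOf (gKey s))).dropWhile
              (fun j => PySem.Set.contains mb j) |>.head? with
      | none => (c, ms, mb)
      | some j => (c + PySem.List.len (gKey s), PySem.Set.add ms i, PySem.Set.add mb j) := by
  intro l
  induction l with
  | nil => intro n c ms mb hms hlen; rfl
  | cons b rest ih =>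
    intro n c ms mb hms hlen
    rw [List.map_cons, enumerate_cons_pv, List.foldl_cons, enumerate_cons_pv,
      List.flatMap_cons, List.dropWhile_append]
    by_cases hmem : (n : Int) ∈ mb
    · have hstep : stepA spaces i (gKey s) (c, ms, mb) (n, forms4 b) = (c, ms, mb) := by
        simp [stepA, hmem]
      have hnil : (repOf (gKey s) (n, b)).dropWhile (fun j => PySem.Set.contains mb j) = [] := by
        apply List.dropWhile_eq_nil_iff.mpr
        intro x hx
        rw [repOf_eq_replicate] at hx
        rw [List.eq_of_mem_replicate hx]
        exact (PySem.Set.contains_iff mb n).mpr hmem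
      rw [hstep, hnil]
      simp only [List.isEmpty_nil, if_true]
      exact ih (n + 1) c ms mb hms hlen
    · by_cases hk : gKey s ∈ forms4 b
      · obtain ⟨m, hm⟩ : ∃ m, ((forms4 b).filter (fun f => f == gKey s)).length = m + 1 := by
          have hmemf : gKey s ∈ (forms4 b).filter (fun f => f == gKey s) :=
            List.mem_filter.mpr ⟨hk, by simp⟩
          have := List.length_pos_of_mem hmemf
          exact ⟨((forms4 b).filter (fun f => f == gKey s)).length - 1, by omega⟩
        have hrep : repOf (gKey s) (n, b) = (n : Int) :: List.replicate m (n : Int) := by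
          rw [repOf_eq_replicate, hm, List.replicate_succ]
        have hdw : List.dropWhile (fun j => PySem.Set.contains mb j)
            ((n : Int) :: List.replicate m (n : Int)) = (n : Int) :: List.replicate m (n : Int) := by
          rw [List.dropWhile_cons]
          simp [hmem]
        have hlen2 : PySem.List.len (PySem.List.pyGetD spaces i []) =
            PySem.List.len (PySem.List.pyGetD (forms4 b) 0 []) := by
          have hg0 : PySem.List.pyGetD (forms4 b) 0 [] = gKey b := by simp [forms4, pysem]
          rw [hg0, hlen]
          have h1 := length_of_mem_forms4 hk
          have h2 := length_gKey s
          have h3 := length_gKey b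
          simp only [PySem.List.len_eq]
          omega
        have hlen2' : (PySem.List.pyGetD spaces i []).length =
            (PySem.List.pyGetD (forms4 b) 0 []).length := by
          simpa [PySem.List.len_eq, Nat.cast_inj] using hlen2
        have hstep : stepA spaces i (gKey s) (c, ms, mb) (n, forms4 b) =
            (c + PySem.List.len (gKey s), PySem.Set.add ms i, PySem.Set.add mb n) := by
          simp [stepA, hms, hmem, hlen2', fbiLoop_eq, hk]
        rw [hrep, hdw, hstep]
        rw [stepA_skip _ _ _ _ _ ((PySem.Set.mem_add ms i i).mpr (Or.inr rfl))]
        simp [List.cons_append]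
      · have hrepnil : repOf (gKey s) (n, b) = [] := by
          simp only [repOf, List.map_eq_nil_iff, List.filter_eq_nil_iff]
          intro f hf hbeq
          exact hk ((eq_of_beq hbeq) ▸ hf)
        have hstep : stepA spaces i (gKey s) (c, ms, mb) (n, forms4 b) = (c, ms, mb) := by
          simp only [stepA]
          split_ifs with h1 h2
          · rw [fbiLoop_eq, if_neg hk]
          · rfl
          · rfl
        rw [hstep, hrepnil]
        simp only [List.dropWhile_nil, List.isEmpty_nil, if_true]
        exact ih (n + 1) c ms mb hms hlen

lemma pairs_eq (blocks : List Shape) :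
    pairsOf blocks =
      (PySem.List.enumerate blocks).flatMap (fun p => (forms4 p.2).map (fun f => (f, p.1))) := by
  unfold pairsOf
  simp only [formsFold_eq]
  rw [PySem.List.foldl_append_eq_flatMap]
  simp

lemma buckets_getD (blocks : List Shape) :
    ∀ k, (bucketsOf blocks).getD k [] = bucket0 blocks k := by
  intro k
  rw [bucketsOf, pairs_eq, PySem.Dict.getD_foldl_modify_append]
  have hrep : repOf k = fun p => List.replicate
      ((forms4 p.2).filter (fun f => f == k)).length p.1 :=
    funext (fun p => repOf_eq_replicate k p)
  simp [bucket0, hrep, List.filter_flatMap, List.map_flatMap,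
    List.filter_map, List.map_map, Function.comp_def]

lemma contains_foldl_modify (k : Shape) :
    ∀ (ps : List (Shape × Int)) (d : PySem.Dict Shape (List Int)),
    (ps.foldl (fun (d : PySem.Dict Shape (List Int)) p =>
        d.modify p.1 [] (fun q => q ++ [p.2])) d).contains k =
      (d.contains k || decide (k ∈ ps.map (fun p => p.1))) := by
  intro ps
  induction ps with
  | nil => intro d; simp
  | cons p rest ih =>
    intro d
    rw [List.foldl_cons, ih, PySem.Dict.contains_modify]
    by_cases hk : k = p.1 <;> by_cases hm : k ∈ List.map (fun p => p.1) rest <;>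
      simp [hk, hm, List.mem_cons]

lemma buckets_contains (blocks : List Shape) :
    ∀ k, (bucketsOf blocks).contains k = true ↔ bucket0 blocks k ≠ [] := by
  intro k
  rw [bucketsOf, pairs_eq, contains_foldl_modify]
  simp only [PySem.Dict.contains_empty, Bool.false_or, decide_eq_true_eq]
  simp [bucket0, repOf, List.mem_map, List.mem_flatMap, List.mem_filter,
    List.eq_nil_iff_forall_not_mem]

-- the outer induction: A's fold over enumerated spaces = B's fold over spaces
lemma outer_eq (spaces blocks : List Shape) :
    ∀ (l : List Shape) (n : Nat) (c : Int) (ms mb : PySem.Set Int)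
      (bq : PySem.Dict Shape (List Int)),
    spaces.drop n = l →
    (∀ x ∈ ms, x < (n : Int)) →
    BInv blocks mb bq →
    ((PySem.List.enumerate (l.map (fun s => gKey s)) (n : Int)).foldl (fun st p =>
        (PySem.List.enumerate (blocks.map forms4)).foldl (stepA spaces p.1 p.2) st)
      (c, ms, mb)).1 =
    (l.foldl stepB (c, mb, bq)).1 := by
  intro l
  induction l with
  | nil => intros; rfl
  | cons s rest ih =>
    intro n c ms mb bq hdrop hms hinv
    have hns : (n : Int) ∉ ms := fun h => absurd (hms _ h) (lt_irrefl _)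
    have hsome : spaces[n]? = some s := by
      rw [← List.head?_drop, hdrop]; rfl
    have hsp : PySem.List.pyGetD spaces (n : Int) [] = s := by
      rw [PySem.List.pyGetD_natCast]
      simp [List.getD, hsome]
    have hlen : PySem.List.len (PySem.List.pyGetD spaces (n : Int) []) = PySem.List.len s := by
      rw [hsp]
    have hdrop' : spaces.drop (n + 1) = rest := by
      rw [← List.tail_drop, hdrop]; rfl
    have hms' : ∀ x ∈ ms, x < ((n + 1 : Nat) : Int) := by
      intro x hx
      have := hms x hx
      push_cast
      omega
    rw [List.map_cons, enumerate_cons_pv, List.foldl_cons, List.foldl_cons,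
      innerA spaces s (n : Int) blocks 0 c ms mb hns hlen]
    have hb : (PySem.List.enumerate blocks).flatMap (repOf (gKey s)) = bucket0 blocks (gKey s) := rfl
    rw [hb]
    obtain ⟨⟨pre, hpre, hpremem⟩, hct⟩ := hinv (gKey s)
    have hdwpre : (bucket0 blocks (gKey s)).dropWhile (fun j => PySem.Set.contains mb j)
        = (bq.getD (gKey s) []).dropWhile (fun j => PySem.Set.contains mb j) := by
      have hnil : pre.dropWhile (fun j => PySem.Set.contains mb j) = [] :=
        List.dropWhile_eq_nil_iff.mpr
          (fun x hx => (PySem.Set.contains_iff mb x).mpr (hpremem x hx))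
      rw [hpre, List.dropWhile_append, hnil]
      simp only [List.isEmpty_nil, if_true]
    by_cases hc : bq.contains (gKey s) = true
    · rw [hdwpre]
      have hc' : bq.contains (sortShape (moveBlockToZero s)) = true := hc
      cases hq : (bq.getD (gKey s) []).dropWhile (fun j => PySem.Set.contains mb j) with
      | nil =>
        have hq' : (bq.getD (sortShape (moveBlockToZero s)) []).dropWhile
            (fun j => PySem.Set.contains mb j) = [] := hq
        have hstepb : stepB (c, mb, bq) s =
            (c, mb, bq.insert (sortShape (moveBlockToZero s)) []) := by
          simp only [stepB, hc', hq', if_true]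
        rw [hstepb]
        simp only [List.head?_nil]
        have hinv' : BInv blocks mb (bq.insert (gKey s) []) := by
          intro k
          by_cases hk : k = gKey s
          · subst hk
            constructor
            · refine ⟨bucket0 blocks (gKey s), by
                rw [PySem.Dict.getD_insert, if_pos rfl, List.append_nil], ?_⟩
              intro j hj
              rw [hpre] at hj
              rcases List.mem_append.mp hj with h | h
              · exact hpremem j h
              · exact (PySem.Set.contains_iff mb j).mp (List.dropWhile_eq_nil_iff.mp hq j h)
            · rw [PySem.Dict.contains_insert]
              have hne : bucket0 blocks (gKey s) ≠ [] := hct.mp hc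
              simp [hne]
          · obtain ⟨⟨prek, hprek, hprekmem⟩, hctk⟩ := hinv k
            constructor
            · exact ⟨prek, by rw [PySem.Dict.getD_insert, if_neg hk]; exact hprek, hprekmem⟩
            · rw [PySem.Dict.contains_insert, beq_eq_false_iff_ne.mpr hk]
              simpa using hctk
        have := ih (n + 1) c ms mb (bq.insert (gKey s) []) hdrop' hms' hinv'
        push_cast at this ⊢
        exact this
      | cons j qrest =>
        have hq' : (bq.getD (sortShape (moveBlockToZero s)) []).dropWhile
            (fun j => PySem.Set.contains mb j) = j :: qrest := hq
        have hlengk : PySem.List.len (gKey s) = PySem.List.len s := by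
          simp [PySem.List.len_eq, length_gKey]
        have hstepb : stepB (c, mb, bq) s =
            (c + PySem.List.len s, PySem.Set.add mb j,
             bq.insert (sortShape (moveBlockToZero s)) qrest) := by
          simp only [stepB, hc', hq', if_true]
        rw [hstepb]
        simp only [List.head?_cons]
        have hmsn : ∀ x ∈ PySem.Set.add ms (n : Int), x < ((n + 1 : Nat) : Int) := by
          intro x hx
          rcases (PySem.Set.mem_add ms (n : Int) x).mp hx with h | h
          · have := hms x h; push_cast; omega
          · subst h; push_cast; omega
        have hinv' : BInv blocks (PySem.Set.add mb j) (bq.insert (gKey s) qrest) := by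
          intro k
          by_cases hk : k = gKey s
          · subst hk
            have hsplit : bucket0 blocks (gKey s) =
                (pre ++ (bq.getD (gKey s) []).takeWhile (fun j => PySem.Set.contains mb j)
                  ++ [j]) ++ qrest := by
              rw [hpre]
              conv_lhs => rw [← List.takeWhile_append_dropWhile
                (p := fun j => PySem.Set.contains mb j) (l := bq.getD (gKey s) [])]
              rw [hq]
              simp
            constructor
            · refine ⟨_, by rw [PySem.Dict.getD_insert, if_pos rfl]; exact hsplit, ?_⟩
              intro x hx
              rcases List.mem_append.mp hx with h | h
              · rcases List.mem_append.mp h with h' | h'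
                · exact (PySem.Set.mem_add mb j x).mpr (Or.inl (hpremem x h'))
                · refine (PySem.Set.mem_add mb j x).mpr (Or.inl ?_)
                  exact (PySem.Set.contains_iff mb x).mp (List.mem_takeWhile_imp h')
              · have : x = j := by simpa using h
                exact (PySem.Set.mem_add mb j x).mpr (Or.inr this)
            · rw [PySem.Dict.contains_insert]
              have hne : bucket0 blocks (gKey s) ≠ [] := hct.mp hc
              simp [hne]
          · obtain ⟨⟨prek, hprek, hprekmem⟩, hctk⟩ := hinv k
            constructor
            · refine ⟨prek, by rw [PySem.Dict.getD_insert, if_neg hk]; exact hprek, ?_⟩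
              intro x hx
              exact (PySem.Set.mem_add mb j x).mpr (Or.inl (hprekmem x hx))
            · rw [PySem.Dict.contains_insert, beq_eq_false_iff_ne.mpr hk]
              simpa using hctk
        have := ih (n + 1) (c + PySem.List.len s) (PySem.Set.add ms (n : Int))
          (PySem.Set.add mb j) (bq.insert (gKey s) qrest)
          hdrop' hmsn hinv'
        rw [hlengk]
        push_cast at this ⊢
        exact this
    · have hb0 : bucket0 blocks (gKey s) = [] := by
        by_contra hne
        exact hc (hct.mpr hne)
      rw [hb0]
      simp only [List.dropWhile_nil, List.head?_nil]
      have hc' : ¬ bq.contains (sortShape (moveBlockToZero s)) = true := hc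
      have hstepb : stepB (c, mb, bq) s = (c, mb, bq) := by
        simp only [stepB, Bool.not_eq_true] at *
        simp [hc']
      rw [hstepb]
      have := ih (n + 1) c ms mb bq hdrop' hms' hinv
      push_cast at this ⊢
      exact this

lemma binv0 (blocks : List Shape) : BInv blocks [] (bucketsOf blocks) := by
  intro k
  constructor
  · exact ⟨[], by rw [buckets_getD]; rfl, by simp⟩
  · exact buckets_contains blocks k

-- ===== VERDICT (by name: the statement is the Claim_ definition above) =====
theorem solution_spec : Claim_equal_solution := by
  intro gb tb _ _
  show solution gb tb = solution_alt gb tb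
  simp only [solution, solution_alt, formsFold_eq]
  exact outer_eq (findNumsDfs gb 0) (findNumsDfs tb 1) (findNumsDfs gb 0) 0 0 [] []
    (bucketsOf (findNumsDfs tb 1)) rfl (by simp) (binv0 (findNumsDfs tb 1))
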